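-- pv_equiv track=rewrite | github.com/ardakdemir/ner-data-selection | annotate_all_entities.py | annotate_sentence
-- ===== SOURCE A (Python) =====
-- def annotate_sentence(entity_dict, sentence, labels, ent_label="Entity"):
--     """
--         Given a dict of entities update the labels of
--     """
--     my_sentence = " ".join(sentence)
--     count = 0
--     for entity, lab in entity_dict.items():
--         lab = ent_label
--         if " " + entity + " " in " " + my_sentence + " ":
--             words = entity.split(" ")
--             word_one = words[0]
--             index = sentence.index(word_one)
--             if all([label == "O" for label in labels[index:index + len(words)]]):
--                 labels[index] = "B-" + lab
--                 for x in range(index + 1, index + len(words)):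
--                     labels[x] = "I-" + lab
--                 count = count + 1
--     return sentence, labels, count
-- ===== SOURCE B (Python) =====
-- def annotate_sentence(entity_dict, sentence, labels, ent_label="Entity"):
--     # Return-value-equivalent re-implementation; mutates `labels` in place like the original.
--     units = [u for tok in sentence for u in tok.split(" ")]
--     first_index = {}
--     for i, tok in enumerate(sentence):
--         if tok not in first_index:
--             first_index[tok] = i
--     ngram_sets = {}
--     count = 0
--     for entity in entity_dict:
--         words = entity.split(" ")
--         m = len(words)
--         if m not in ngram_sets:
--             ngram_sets[m] = set(tuple(units[j:j + m]) for j in range(len(units) - m + 1))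
--         if tuple(words) in ngram_sets[m]:
--             index = first_index[words[0]]
--             if all(label == "O" for label in labels[index:index + m]):
--                 labels[index] = "B-" + ent_label
--                 for x in range(index + 1, index + m):
--                     labels[x] = "I-" + ent_label
--                 count += 1
--     return sentence, labels, count
-- ===== Notes on version B (the rewrite author's own statement) =====
-- stated objective: faster
-- what changed: Instead of re-scanning the joined sentence string with a substring test and calling sentence.index for every entity, B precomputes the token units, a word-to-first-index dict and a set of token n-grams per entity word-count, so each entity is decided by one set/dict lookup.
import Mathlib
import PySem

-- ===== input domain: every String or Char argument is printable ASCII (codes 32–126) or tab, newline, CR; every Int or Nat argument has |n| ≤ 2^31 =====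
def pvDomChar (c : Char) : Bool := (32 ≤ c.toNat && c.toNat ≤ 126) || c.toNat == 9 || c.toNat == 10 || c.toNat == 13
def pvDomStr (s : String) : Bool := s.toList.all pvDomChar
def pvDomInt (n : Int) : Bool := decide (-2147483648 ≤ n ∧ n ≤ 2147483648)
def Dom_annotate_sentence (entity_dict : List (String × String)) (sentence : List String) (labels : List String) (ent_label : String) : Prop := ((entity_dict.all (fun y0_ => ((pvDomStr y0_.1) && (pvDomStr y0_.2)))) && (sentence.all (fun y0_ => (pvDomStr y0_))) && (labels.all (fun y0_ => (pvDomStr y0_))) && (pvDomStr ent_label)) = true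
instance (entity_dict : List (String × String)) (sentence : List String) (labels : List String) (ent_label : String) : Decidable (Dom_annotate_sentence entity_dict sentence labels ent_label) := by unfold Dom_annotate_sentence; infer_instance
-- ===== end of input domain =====

-- B replaces A's per-entity substring scan of the joined sentence and per-entity list.index by a
-- precomputed n-gram set per entity length and a word → first-index dict (objective: faster).
-- Both Pythons mutate `labels` in place identically; the equivalence proved is about the return value.

-- ===== PORT A =====
def annotate_sentence (entity_dict : List (String × String)) (sentence : List String) (labels : List String) (ent_label : String) : List String × List String × Int :=
  let my_sentence := PySem.Str.join " " sentence
  let st := entity_dict.foldl (fun (st : List String × Int) (p : String × String) =>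
    -- `lab = ent_label` overwrites the dict value, so p.2 is never used
    if PySem.Str.isIn (" " ++ p.1 ++ " ") (" " ++ my_sentence ++ " ") then
      let words := (PySem.Str.split? p.1 " ").getD []   -- entity.split(" "): sep ≠ "" so split? is `some` (exact)
      let word_one := words.headD ""                    -- words[0]: split(" ") never returns [] (exact)
      match PySem.List.index? sentence word_one with
      | none => st                                      -- Python raises ValueError here; excluded by Pre_
      | some index =>
        if (PySem.List.slice st.1 (some (index : Int)) (some ((index : Int) + words.length))).all
            (fun label => label == "O") then
          let labels1 := st.1.set index ("B-" ++ ent_label)   -- in range under Pre_; Python raises IndexError otherwise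
          let labels2 := (PySem.List.pyRange ((index : Int) + 1) ((index : Int) + words.length) 1).foldl
              (fun ls x => ls.set x.toNat ("I-" ++ ent_label)) labels1   -- x ≥ 0 on this range (exact)
          (labels2, st.2 + 1)
        else st
    else st) (labels, 0)
  (sentence, st.1, st.2)

-- ===== PORT B =====
def annotate_sentence_alt (entity_dict : List (String × String)) (sentence : List String) (labels : List String) (ent_label : String) : List String × List String × Int :=
  let units := sentence.flatMap (fun tok => (PySem.Str.split? tok " ").getD [])   -- [u for tok in sentence for u in tok.split(" ")]
  let first_index := (PySem.List.enumerate sentence).foldl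
      (fun (d : PySem.Dict String Int) (p : Int × String) =>
        if (d.get? p.2).isNone then d.insert p.2 p.1 else d) PySem.Dict.empty
  let st := entity_dict.foldl
    (fun (st : (List String × Int) × PySem.Dict Int (PySem.Set (List String))) (p : String × String) =>
      let words := (PySem.Str.split? p.1 " ").getD []
      let m := words.length
      let cache := if (st.2.get? (m : Int)).isNone
        then st.2.insert (m : Int) (PySem.Set.ofList
              ((PySem.List.pyRange 0 ((units.length : Int) - (m : Int) + 1) 1).map
                (fun j => PySem.List.slice units (some j) (some (j + (m : Int))))))
        else st.2
      if PySem.Set.contains ((cache.get? (m : Int)).getD PySem.Set.empty) words then   -- ngram_sets[m] is always present here (exact)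
        match first_index.get? (words.headD "") with
        | none => (st.1, cache)                         -- Python raises KeyError here; excluded by Pre_
        | some index =>
          if (PySem.List.slice st.1.1 (some index) (some (index + (m : Int)))).all
              (fun label => label == "O") then
            let labels1 := st.1.1.set index.toNat ("B-" ++ ent_label)
            let labels2 := (PySem.List.pyRange (index + 1) (index + (m : Int)) 1).foldl
                (fun ls x => ls.set x.toNat ("I-" ++ ent_label)) labels1
            ((labels2, st.1.2 + 1), cache)
          else (st.1, cache)
      else (st.1, cache)) ((labels, 0), PySem.Dict.empty)
  (sentence, st.1.1, st.1.2)

-- ===== PRECONDITION & SPEC =====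
-- Pre_ excludes inputs where a matched entity (its space-split words occur as a contiguous run of
-- the space-split tokens — A's padded-substring test; on an empty sentence only the entity ""
-- matches) has a first word that is not a token of `sentence` (A raises ValueError), or a span
-- that overruns the end of `labels` while the initial labels under the truncated span are all "O"
-- (A raises IndexError there, except in the rare case that an earlier matched entity already wrote
-- into that span and so averts the raise — on those excluded inputs A and B return the same value).
def Pre_annotate_sentence (entity_dict : List (String × String)) (sentence : List String) (labels : List String) (ent_label : String) : Prop :=
  (sentence = [] → ∀ p ∈ entity_dict, p.1 ≠ "") ∧
  ∀ p ∈ entity_dict,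
    ((PySem.Str.split? p.1 " ").getD []) <:+:
        (sentence.flatMap (fun tok => (PySem.Str.split? tok " ").getD [])) →
    (Option.any (fun k =>
        decide (k + ((PySem.Str.split? p.1 " ").getD []).length ≤ labels.length)
        || !(((labels.drop k).take ((PySem.Str.split? p.1 " ").getD []).length).all
              (fun l => l == "O")))
      (PySem.List.index? sentence (((PySem.Str.split? p.1 " ").getD []).headD ""))) = true
instance (entity_dict : List (String × String)) (sentence : List String) (labels : List String) (ent_label : String) : Decidable (Pre_annotate_sentence entity_dict sentence labels ent_label) := by unfold Pre_annotate_sentence; infer_instance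

def pvWitness_annotate_sentence : (List (String × String)) × List String × List String × String :=
  ([("a", "x"), ("a b", "y"), ("zz", "t")], ["a", "b"], ["O", "O"], "Ent")

def Spec_annotate_sentence (entity_dict : List (String × String)) (sentence : List String) (labels : List String) (ent_label : String) (out : List String × List String × Int) : Prop := out = annotate_sentence_alt entity_dict sentence labels ent_label
instance (entity_dict : List (String × String)) (sentence : List String) (labels : List String) (ent_label : String) (out : List String × List String × Int) : Decidable (Spec_annotate_sentence entity_dict sentence labels ent_label out) := by unfold Spec_annotate_sentence; infer_instance

-- ===== CLAIM (what is proved, stated in full; the proofs are below) =====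
def Claim_equal_annotate_sentence : Prop := ∀ (entity_dict : List (String × String)) (sentence : List String) (labels : List String) (ent_label : String), Dom_annotate_sentence entity_dict sentence labels ent_label → Pre_annotate_sentence entity_dict sentence labels ent_label → Spec_annotate_sentence entity_dict sentence labels ent_label (annotate_sentence entity_dict sentence labels ent_label)

-- ===== LEMMAS AND PROOFS =====

-- Structural model of s.split(" ") on the char level
def pvSplit : List Char → List (List Char)
  | [] => [[]]
  | c :: rest => if c = ' ' then [] :: pvSplit rest else (pvSplit rest).modifyHead (c :: ·)

theorem pvSplit_ne_nil (l : List Char) : pvSplit l ≠ [] := by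
  induction l with
  | nil => simp [pvSplit]
  | cons c rest ih =>
    simp only [pvSplit]
    split_ifs
    · simp
    · intro h
      exact ih (by simpa using congrArg List.length h)

theorem pvSplit_go_eq (fuel : Nat) : ∀ (l cur : List Char) (acc : List (List Char)),
    l.length + 1 ≤ fuel →
    PySem.Chars.splitOn.go [' '] fuel l cur acc
      = acc.reverse ++ (pvSplit l).modifyHead (cur.reverse ++ ·) := by
  induction fuel with
  | zero => intro l cur acc h; omega
  | succ n ih =>
    intro l cur acc h
    cases l with
    | nil =>
      show (cur.reverse :: acc).reverse = _
      simp [pvSplit]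
    | cons c rest =>
      rw [show PySem.Chars.splitOn.go [' '] (n+1) (c :: rest) cur acc =
          if [' '].isPrefixOf (c :: rest) then
            PySem.Chars.splitOn.go [' '] n (List.drop 1 (c :: rest)) [] (cur.reverse :: acc)
          else PySem.Chars.splitOn.go [' '] n rest (c :: cur) acc from rfl]
      obtain ⟨a, t, hP⟩ := List.exists_cons_of_ne_nil (pvSplit_ne_nil rest)
      by_cases hb : ([' '].isPrefixOf (c :: rest)) = true
      · rw [if_pos hb]
        have hc : c = ' ' := by
          rcases List.cons_prefix_cons.mp (List.isPrefixOf_iff_prefix.mp hb) with ⟨h1, _⟩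
          exact h1.symm
        subst hc
        rw [show List.drop 1 (' ' :: rest) = rest from rfl,
            ih rest [] (cur.reverse :: acc) (by simp at h ⊢; omega)]
        simp [pvSplit, hP]
      · rw [if_neg hb]
        have hc : ¬ (c = ' ') := by
          intro e; subst e; simp [List.isPrefixOf] at hb
        rw [ih rest (c :: cur) acc (by simp at h ⊢; omega)]
        simp [pvSplit, hc, hP]

theorem splitOn_space (s : List Char) : PySem.Chars.splitOn s [' '] = pvSplit s := by
  have h := pvSplit_go_eq (s.length + 1) s [] [] (le_refl _)
  obtain ⟨a, t, hP⟩ := List.exists_cons_of_ne_nil (pvSplit_ne_nil s)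
  rw [show PySem.Chars.splitOn s [' '] = PySem.Chars.splitOn.go [' '] (s.length + 1) s [] [] from rfl, h, hP]
  simp

theorem pvSplit_no_space (l : List Char) : ∀ w ∈ pvSplit l, ' ' ∉ w := by
  induction l with
  | nil => intro w hw; simp [pvSplit] at hw; simp [hw]
  | cons c rest ih =>
    intro w hw
    obtain ⟨a, t, hP⟩ := List.exists_cons_of_ne_nil (pvSplit_ne_nil rest)
    by_cases hc : c = ' '
    · subst hc
      simp [pvSplit] at hw
      rcases hw with h | h
      · simp [h]
      · exact ih w h
    · simp [pvSplit, hc, hP, List.modifyHead_cons] at hw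
      rcases hw with h | h
      · subst h
        intro hmem
        rcases List.mem_cons.mp hmem with h | h
        · exact hc h.symm
        · exact ih a (by rw [hP]; exact List.mem_cons_self ..) h
      · exact ih w (by rw [hP]; exact List.mem_cons_of_mem _ h)

theorem pvInter_singleton (s a : List Char) : List.intercalate s [a] = a := by
  simp [List.intercalate]

theorem pvInter_cons_cons (s a b : List Char) (t : List (List Char)) :
    List.intercalate s (a :: b :: t) = a ++ s ++ List.intercalate s (b :: t) := by
  simp [List.intercalate]

theorem pvSplit_intercalate (l : List Char) : List.intercalate [' '] (pvSplit l) = l := by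
  induction l with
  | nil => simp [pvSplit, pvInter_singleton]
  | cons c rest ih =>
    obtain ⟨a, t, hP⟩ := List.exists_cons_of_ne_nil (pvSplit_ne_nil rest)
    by_cases hc : c = ' '
    · subst hc
      rw [show pvSplit (' ' :: rest) = [] :: pvSplit rest from by simp [pvSplit], hP,
          pvInter_cons_cons, ← hP, ih]
      simp
    · rw [show pvSplit (c :: rest) = (pvSplit rest).modifyHead (c :: ·) from by simp [pvSplit, hc],
          hP, List.modifyHead_cons]
      rw [hP] at ih
      cases t with
      | nil =>
        rw [pvInter_singleton]
        rw [pvInter_singleton] at ih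
        rw [ih]
      | cons b t' =>
        rw [pvInter_cons_cons] at ih
        rw [pvInter_cons_cons]
        simp only [List.cons_append]
        rw [ih]

-- the ' '-terminated flatten form of a padded join
def pvFlat (xs : List (List Char)) : List Char := (xs.map (fun w => w ++ [' '])).flatten

theorem pvFlat_cons (w : List Char) (xs : List (List Char)) :
    pvFlat (w :: xs) = w ++ ' ' :: pvFlat xs := by
  simp [pvFlat]

theorem pvFlat_append (a b : List (List Char)) : pvFlat (a ++ b) = pvFlat a ++ pvFlat b := by
  simp [pvFlat]

theorem pvFlat_last (a : List (List Char)) (h : a ≠ []) : ∃ r, pvFlat a = r ++ [' '] := by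
  induction a with
  | nil => exact absurd rfl h
  | cons x t ih =>
    cases t with
    | nil => exact ⟨x, by simp [pvFlat]⟩
    | cons y t' =>
      obtain ⟨r, hr⟩ := ih (by simp)
      exact ⟨x ++ ' ' :: r, by rw [pvFlat_cons, hr]; simp⟩

theorem pvPad_eq (xs : List (List Char)) (h : xs ≠ []) :
    List.intercalate [' '] xs ++ [' '] = pvFlat xs := by
  induction xs with
  | nil => exact absurd rfl h
  | cons x t ih =>
    cases t with
    | nil => rw [pvInter_singleton, pvFlat_cons]; simp [pvFlat]
    | cons y t' =>
      rw [pvInter_cons_cons, pvFlat_cons, ← ih (by simp)]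
      simp

theorem pvPad_split (cs : List Char) : cs ++ [' '] = pvFlat (pvSplit cs) := by
  conv_lhs => rw [← pvSplit_intercalate cs]
  exact pvPad_eq _ (pvSplit_ne_nil cs)

-- prefix-code property: words are space-free, so padded flattening reflects prefixes
theorem pvWord_prefix : ∀ (w u x y : List Char), ' ' ∉ w → ' ' ∉ u →
    (w ++ ' ' :: x <+: u ++ ' ' :: y) → w = u ∧ x <+: y := by
  intro w
  induction w with
  | nil =>
    intro u x y _ hu h
    cases u with
    | nil =>
      simp only [List.nil_append, List.cons_prefix_cons] at h
      exact ⟨rfl, h.2⟩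
    | cons c u' =>
      simp only [List.nil_append, List.cons_append, List.cons_prefix_cons] at h
      exact absurd h.1 (fun e => hu (by rw [← e]; exact List.mem_cons_self ..))
  | cons a w' ih =>
    intro u x y hw hu h
    cases u with
    | nil =>
      simp only [List.cons_append, List.nil_append, List.cons_prefix_cons] at h
      exact absurd h.1 (fun e => hw (by rw [e]; exact List.mem_cons_self ..))
    | cons c u' =>
      simp only [List.cons_append, List.cons_prefix_cons] at h
      rcases h with ⟨hac, hrest⟩
      rcases ih u' x y (fun hm => hw (List.mem_cons_of_mem _ hm))
        (fun hm => hu (List.mem_cons_of_mem _ hm)) hrest with ⟨he, hxy⟩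
      exact ⟨by rw [hac, he], hxy⟩

theorem pvFlat_prefix : ∀ (ws us : List (List Char)), (∀ w ∈ ws, ' ' ∉ w) → (∀ u ∈ us, ' ' ∉ u) →
    pvFlat ws <+: pvFlat us → ws <+: us := by
  intro ws
  induction ws with
  | nil => intro us _ _ _; exact List.nil_prefix
  | cons w ws' ih =>
    intro us hw hu h
    rw [pvFlat_cons] at h
    cases us with
    | nil =>
      exfalso
      rw [show pvFlat [] = [] from rfl, List.prefix_nil] at h
      simp at h
    | cons u us' =>
      rw [pvFlat_cons] at h
      rcases pvWord_prefix w u _ _ (hw w (List.mem_cons_self ..)) (hu u (List.mem_cons_self ..)) h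
        with ⟨he, hp⟩
      exact List.cons_prefix_cons.mpr ⟨he,
        ih us' (fun x hm => hw x (List.mem_cons_of_mem _ hm))
          (fun x hm => hu x (List.mem_cons_of_mem _ hm)) hp⟩

theorem pvSkip : ∀ (u v z : List Char), ' ' ∉ u → ((' ' :: z) <:+: u ++ v) → (' ' :: z) <:+: v := by
  intro u
  induction u with
  | nil => intro v z _ h; simpa using h
  | cons c u' ih =>
    intro v z hu h
    rw [List.cons_append, List.infix_cons_iff] at h
    rcases h with h | h
    · exact absurd (List.cons_prefix_cons.mp h).1
        (fun e => hu (by rw [← e]; exact List.mem_cons_self ..))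
    · exact ih v z (fun hm => hu (List.mem_cons_of_mem _ hm)) h

theorem pvBig_mp : ∀ (us ws : List (List Char)), (∀ w ∈ ws, ' ' ∉ w) → (∀ u ∈ us, ' ' ∉ u) →
    ((' ' :: pvFlat ws) <:+: (' ' :: pvFlat us)) → ws <:+: us := by
  intro us
  induction us with
  | nil =>
    intro ws _ _ h
    cases ws with
    | nil => exact List.nil_infix
    | cons w t =>
      exfalso
      have hlen := h.length_le
      rw [pvFlat_cons, show pvFlat ([] : List (List Char)) = [] from rfl] at hlen
      simp only [List.length_cons, List.length_append, List.length_nil] at hlen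
      omega
  | cons u us' ih =>
    intro ws hw hu h
    rw [pvFlat_cons] at h
    rcases List.infix_cons_iff.mp h with h | h
    · rcases List.cons_prefix_cons.mp h with ⟨_, hp⟩
      rw [← pvFlat_cons] at hp
      exact (pvFlat_prefix ws (u :: us') hw hu hp).isInfix
    · have hskip := pvSkip u (' ' :: pvFlat us') (pvFlat ws) (hu u (List.mem_cons_self ..)) h
      have hi := ih ws hw (fun x hm => hu x (List.mem_cons_of_mem _ hm)) hskip
      exact List.infix_cons_iff.mpr (Or.inr hi)

theorem pvBig_mpr (ws us : List (List Char)) (h : ws <:+: us) :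
    (' ' :: pvFlat ws) <:+: (' ' :: pvFlat us) := by
  rcases h with ⟨s, t, rfl⟩
  cases s with
  | nil => exact ⟨[], pvFlat t, by simp [pvFlat_append]⟩
  | cons a s' =>
    obtain ⟨r, hr⟩ := pvFlat_last (a :: s') (by simp)
    refine ⟨' ' :: r, pvFlat t, ?_⟩
    have h2 : pvFlat ((a :: s') ++ ws ++ t) = r ++ [' '] ++ pvFlat ws ++ pvFlat t := by
      rw [pvFlat_append, pvFlat_append, hr]
    rw [h2]
    simp

theorem pvMain (ecs jcs : List Char) :
    ((' ' :: (ecs ++ [' '])) <:+: (' ' :: (jcs ++ [' ']))) ↔ pvSplit ecs <:+: pvSplit jcs := by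
  rw [pvPad_split ecs, pvPad_split jcs]
  exact ⟨pvBig_mp (pvSplit jcs) (pvSplit ecs) (pvSplit_no_space ecs) (pvSplit_no_space jcs),
    pvBig_mpr _ _⟩

theorem pvMapInfix {α β : Type} {f : α → β} (hf : Function.Injective f) (ws us : List α) :
    (ws.map f <:+: us.map f) ↔ ws <:+: us := by
  constructor
  · rintro ⟨s, t, he⟩
    rcases List.map_eq_append_iff.mp he.symm with ⟨l1, l2, h12, hs1, ht⟩
    rcases List.map_eq_append_iff.mp hs1 with ⟨a, b, hab, hsa, hwb⟩
    have hb : b = ws := List.map_injective_iff.mpr hf hwb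
    exact ⟨a, l2, by rw [h12, hab, hb]⟩
  · intro h; exact h.map f

theorem pvWordsToList (e : String) :
    ((PySem.Str.split? e " ").getD []).map String.toList = pvSplit e.toList := by
  simp [PySem.Str.split?, PySem.Chars.split?, show (" " : String).toList = [' '] from rfl,
    splitOn_space, List.map_map, Function.comp_def, String.toList_ofList]

theorem pvWords_ne_nil (e : String) : (PySem.Str.split? e " ").getD [] ≠ [] := by
  intro h
  have h2 := congrArg (List.map String.toList) h
  rw [pvWordsToList] at h2
  exact pvSplit_ne_nil _ (by simpa using h2)

theorem pvSplit_append (x r : List Char) :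
    pvSplit (x ++ ' ' :: r) = pvSplit x ++ pvSplit r := by
  induction x with
  | nil => simp [pvSplit]
  | cons c x' ih =>
    by_cases hc : c = ' '
    · subst hc; simp [pvSplit, ih]
    · obtain ⟨a, t, hP⟩ := List.exists_cons_of_ne_nil (pvSplit_ne_nil x')
      simp [pvSplit, hc, ih, hP, List.modifyHead_cons]

theorem pvSplit_intercalate_flat : ∀ (l : List (List Char)), l ≠ [] →
    l.flatMap pvSplit = pvSplit (List.intercalate [' '] l) := by
  intro l
  induction l with
  | nil => intro h; exact absurd rfl h
  | cons x t ih =>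
    intro _
    cases t with
    | nil => simp [pvInter_singleton]
    | cons y t' =>
      rw [pvInter_cons_cons,
        show x ++ [' '] ++ List.intercalate [' '] (y :: t') = x ++ ' ' :: List.intercalate [' '] (y :: t') from by simp,
        pvSplit_append, List.flatMap_cons, ih (by simp)]

theorem pvUnits_eq (sentence : List String) (hs : sentence ≠ []) :
    sentence.flatMap (fun tok => (PySem.Str.split? tok " ").getD [])
      = (PySem.Str.split? (PySem.Str.join " " sentence) " ").getD [] := by
  apply List.map_injective_iff.mpr (fun a b h => String.toList_inj.mp h)
  rw [List.map_flatMap, pvWordsToList]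
  have h2 : (PySem.Str.join " " sentence).toList
      = List.intercalate [' '] (sentence.map String.toList) := by
    simp [PySem.Str.toList_join, PySem.Chars.join, show (" " : String).toList = [' '] from rfl]
  rw [h2, ← pvSplit_intercalate_flat (sentence.map String.toList) (by simpa using hs)]
  simp only [List.flatMap_map, Function.comp_def, pvWordsToList]

theorem test_eq (e : String) (sentence : List String) :
    PySem.Str.isIn (" " ++ e ++ " ") (" " ++ PySem.Str.join " " sentence ++ " ")
      = decide (((PySem.Str.split? e " ").getD []) <:+:
          ((PySem.Str.split? (PySem.Str.join " " sentence) " ").getD [])) := by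
  rw [Bool.eq_iff_iff, decide_eq_true_eq, PySem.Str.isIn_iff_infix]
  have hts : ∀ s : String, (" " ++ s ++ " ").toList = ' ' :: (s.toList ++ [' ']) := by
    intro s
    simp [String.toList_append, show (" " : String).toList = [' '] from rfl]
  rw [hts, hts, pvMain, ← pvWordsToList, ← pvWordsToList]
  exact pvMapInfix (fun a b h => String.toList_inj.mp h) _ _

theorem pvInfix_iff_slice {α : Type} (ws us : List α) :
    ws <:+: us ↔ ∃ j : Nat, j + ws.length ≤ us.length ∧ (us.drop j).take ws.length = ws := by
  constructor
  · rintro ⟨s, t, rfl⟩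
    refine ⟨s.length, ?_, ?_⟩
    · rw [List.length_append, List.length_append]; omega
    · rw [show s ++ ws ++ t = s ++ (ws ++ t) from by simp, List.drop_left, List.take_left]
  · rintro ⟨j, hj, heq⟩
    exact heq ▸ ((List.take_prefix _ _).isInfix.trans (List.drop_suffix _ _).isInfix)

-- the n-gram set B precomputes per word-count
def pvNgram (units : List String) (m : Nat) : PySem.Set (List String) :=
  PySem.Set.ofList ((PySem.List.pyRange 0 ((units.length : Int) - (m : Int) + 1) 1).map
    (fun j => PySem.List.slice units (some j) (some (j + (m : Int)))))

theorem bmem_eq (units ws : List String) :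
    PySem.Set.contains (pvNgram units ws.length) ws = decide (ws <:+: units) := by
  rw [Bool.eq_iff_iff, decide_eq_true_eq, pvNgram, PySem.Set.contains_iff, PySem.Set.mem_ofList,
    List.mem_map, pvInfix_iff_slice]
  constructor
  · rintro ⟨j, hj, heq⟩
    rw [PySem.List.mem_pyRange_one] at hj
    obtain ⟨h0, hlt⟩ := hj
    lift j to Nat using h0 with jn
    refine ⟨jn, by omega, ?_⟩
    rw [PySem.List.slice_natCast_add] at heq
    exact heq
  · rintro ⟨j, hle, heq⟩
    refine ⟨(j : Int), ?_, ?_⟩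
    · rw [PySem.List.mem_pyRange_one]
      exact ⟨Int.natCast_nonneg j, by omega⟩
    · rw [PySem.List.slice_natCast_add]
      exact heq

theorem pvFI (w : String) : ∀ (l : List String) (s : Int) (d : PySem.Dict String Int),
    ((PySem.List.enumerate l s).foldl
      (fun d p => if (d.get? p.2).isNone then d.insert p.2 p.1 else d) d).get? w
      = (d.get? w).or ((PySem.List.index? l w).map (fun k : Nat => s + (k : Int))) := by
  intro l
  induction l with
  | nil =>
    intro s d
    rw [PySem.List.enumerate_nil]
    simp [PySem.List.index?_eq_idxOf?]
  | cons x l ih =>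
    intro s d
    rw [PySem.List.enumerate_cons]
    simp only [List.foldl_cons]
    rw [ih]
    by_cases hx : x = w
    · subst hx
      rw [PySem.List.index?_cons_self]
      cases hd : d.get? x with
      | none => simp [PySem.Dict.get?_insert]
      | some v => simp [hd]
    · rw [PySem.List.index?_cons_of_ne _ hx]
      have hstep : (if (d.get? x).isNone then d.insert x s else d).get? w = d.get? w := by
        split_ifs with h
        · rw [PySem.Dict.get?_insert]
          rw [if_neg (fun e => hx e.symm)]
        · rfl
      rw [hstep]
      cases hidx : PySem.List.index? l w with
      | none => rfl
      | some k =>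
        simp only [Option.map]
        have he : s + 1 + (k : Int) = s + ((k + 1 : Nat) : Int) := by push_cast; ring
        rw [he]

theorem pvDictEmpty_get {κ ν : Type} [BEq κ] (k : κ) :
    (PySem.Dict.empty : PySem.Dict κ ν).get? k = none := by
  simp [PySem.Dict.get?, PySem.Dict.empty]

theorem pvFI0 (sentence : List String) (w : String) :
    ((PySem.List.enumerate sentence).foldl
      (fun d p => if (d.get? p.2).isNone then d.insert p.2 p.1 else d) PySem.Dict.empty).get? w
      = (PySem.List.index? sentence w).map (fun k : Nat => (k : Int)) := by
  rw [pvFI w sentence 0 PySem.Dict.empty, pvDictEmpty_get]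
  cases PySem.List.index? sentence w <;> simp

-- named forms of the two fold bodies (definitionally equal to the ports' lambdas)
def pvStepA (sentence : List String) (ent_label : String) (st : List String × Int)
    (p : String × String) : List String × Int :=
  if PySem.Str.isIn (" " ++ p.1 ++ " ") (" " ++ PySem.Str.join " " sentence ++ " ") then
    match PySem.List.index? sentence (((PySem.Str.split? p.1 " ").getD []).headD "") with
    | none => st
    | some index =>
      if (PySem.List.slice st.1 (some (index : Int))
            (some ((index : Int) + ((PySem.Str.split? p.1 " ").getD []).length))).all
          (fun label => label == "O") then
        ((PySem.List.pyRange ((index : Int) + 1)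
            ((index : Int) + ((PySem.Str.split? p.1 " ").getD []).length) 1).foldl
          (fun ls x => ls.set x.toNat ("I-" ++ ent_label)) (st.1.set index ("B-" ++ ent_label)),
         st.2 + 1)
      else st
  else st

def pvCacheUpd (units : List String) (c : PySem.Dict Int (PySem.Set (List String))) (m : Nat) :
    PySem.Dict Int (PySem.Set (List String)) :=
  if (c.get? (m : Int)).isNone then c.insert (m : Int) (pvNgram units m) else c

def pvStepB (units : List String) (FI : PySem.Dict String Int) (ent_label : String)
    (st : (List String × Int) × PySem.Dict Int (PySem.Set (List String)))
    (p : String × String) : (List String × Int) × PySem.Dict Int (PySem.Set (List String)) :=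
  if PySem.Set.contains
      (((pvCacheUpd units st.2 ((PySem.Str.split? p.1 " ").getD []).length).get?
          (((PySem.Str.split? p.1 " ").getD []).length : Int)).getD PySem.Set.empty)
      ((PySem.Str.split? p.1 " ").getD []) then
    match FI.get? (((PySem.Str.split? p.1 " ").getD []).headD "") with
    | none => (st.1, pvCacheUpd units st.2 ((PySem.Str.split? p.1 " ").getD []).length)
    | some index =>
      if (PySem.List.slice st.1.1 (some index)
            (some (index + (((PySem.Str.split? p.1 " ").getD []).length : Int)))).all
          (fun label => label == "O") then
        (((PySem.List.pyRange (index + 1)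
              (index + (((PySem.Str.split? p.1 " ").getD []).length : Int)) 1).foldl
            (fun ls x => ls.set x.toNat ("I-" ++ ent_label))
            (st.1.1.set index.toNat ("B-" ++ ent_label)),
          st.1.2 + 1),
         pvCacheUpd units st.2 ((PySem.Str.split? p.1 " ").getD []).length)
      else (st.1, pvCacheUpd units st.2 ((PySem.Str.split? p.1 " ").getD []).length)
  else (st.1, pvCacheUpd units st.2 ((PySem.Str.split? p.1 " ").getD []).length)

theorem pvCacheUpd_ok (units : List String) (cache : PySem.Dict Int (PySem.Set (List String)))
    (m : Nat) (hc : ∀ (mi : Nat) st, cache.get? (mi : Int) = some st → st = pvNgram units mi) :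
    ∀ (mi : Nat) st, (pvCacheUpd units cache m).get? (mi : Int) = some st → st = pvNgram units mi := by
  intro mi st h
  unfold pvCacheUpd at h
  split_ifs at h with h0
  · rw [PySem.Dict.get?_insert] at h
    by_cases hmi : (mi : Int) = (m : Int)
    · rw [if_pos hmi] at h
      have hm : mi = m := by exact_mod_cast hmi
      rw [hm]
      exact (Option.some_inj.mp h).symm
    · rw [if_neg hmi] at h
      exact hc mi st h
  · exact hc mi st h

theorem pvCacheUpd_get (units : List String) (cache : PySem.Dict Int (PySem.Set (List String)))
    (m : Nat) (hc : ∀ (mi : Nat) st, cache.get? (mi : Int) = some st → st = pvNgram units mi) :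
    ((pvCacheUpd units cache m).get? (m : Int)).getD PySem.Set.empty = pvNgram units m := by
  unfold pvCacheUpd
  cases h0 : cache.get? (m : Int) with
  | none =>
    have hcnd : (none : Option (PySem.Set (List String))).isNone = true := rfl
    rw [if_pos hcnd, PySem.Dict.get?_insert, if_pos rfl]
    rfl
  | some st =>
    rw [if_neg (by simp), h0]
    exact hc m st h0

theorem pvStep_eq (sentence : List String) (ent_label : String) (units : List String)
    (hunits : units = sentence.flatMap (fun tok => (PySem.Str.split? tok " ").getD []))
    (FI : PySem.Dict String Int)
    (hFI : ∀ w, FI.get? w = (PySem.List.index? sentence w).map (fun k : Nat => (k : Int)))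
    (st : (List String × Int) × PySem.Dict Int (PySem.Set (List String)))
    (p : String × String)
    (hc : ∀ (mi : Nat) s, st.2.get? (mi : Int) = some s → s = pvNgram units mi) :
    pvStepB units FI ent_label st p
      = (pvStepA sentence ent_label st.1 p,
         pvCacheUpd units st.2 ((PySem.Str.split? p.1 " ").getD []).length) := by
  have hfi2 := hFI (((PySem.Str.split? p.1 " ").getD []).headD "")
  by_cases hs : sentence = []
  · subst hs
    have hu : units = [] := hunits
    unfold pvStepB pvStepA
    rw [pvCacheUpd_get units st.2 ((PySem.Str.split? p.1 " ").getD []).length hc]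
    have hcont : PySem.Set.contains (pvNgram units ((PySem.Str.split? p.1 " ").getD []).length)
        ((PySem.Str.split? p.1 " ").getD []) = false := by
      obtain ⟨a, t, hWS⟩ := List.exists_cons_of_ne_nil (pvWords_ne_nil p.1)
      rw [pvNgram, hu, hWS]
      rw [PySem.List.pyRange_one_eq_nil
        (by simp only [List.length_nil, List.length_cons]; push_cast; omega)]
      rfl
    rw [hcont, if_neg (by simp)]
    split_ifs
    · exact rfl
    · rfl
  ·
    unfold pvStepB pvStepA
    rw [pvCacheUpd_get units st.2 ((PySem.Str.split? p.1 " ").getD []).length hc]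
    rw [show PySem.Set.contains (pvNgram units ((PySem.Str.split? p.1 " ").getD []).length)
          ((PySem.Str.split? p.1 " ").getD [])
        = PySem.Str.isIn (" " ++ p.1 ++ " ") (" " ++ PySem.Str.join " " sentence ++ " ") from by
      rw [bmem_eq, test_eq, hunits, pvUnits_eq sentence hs]]
    by_cases ht : PySem.Str.isIn (" " ++ p.1 ++ " ") (" " ++ PySem.Str.join " " sentence ++ " ") = true
    · rw [if_pos ht, if_pos ht]
      cases hidx : PySem.List.index? sentence (((PySem.Str.split? p.1 " ").getD []).headD "") with
      | none =>
        rw [hidx] at hfi2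
        rw [hfi2]
        exact rfl
      | some k =>
        rw [hidx] at hfi2
        simp only [Option.map] at hfi2
        rw [hfi2]
        simp only [Int.toNat_natCast]
        split_ifs <;> rfl
    · rw [if_neg ht, if_neg ht]

theorem pvLoop (sentence : List String) (ent_label : String) (units : List String)
    (hunits : units = sentence.flatMap (fun tok => (PySem.Str.split? tok " ").getD []))
    (FI : PySem.Dict String Int)
    (hFI : ∀ w, FI.get? w = (PySem.List.index? sentence w).map (fun k : Nat => (k : Int))) :
    ∀ (ed : List (String × String)) (stA : List String × Int)
      (cache : PySem.Dict Int (PySem.Set (List String))),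
      (∀ (mi : Nat) st, cache.get? (mi : Int) = some st → st = pvNgram units mi) →
      ed.foldl (pvStepA sentence ent_label) stA
        = (ed.foldl (pvStepB units FI ent_label) (stA, cache)).1 := by
  intro ed
  induction ed with
  | nil => intro stA cache _; rfl
  | cons p tl ih =>
    intro stA cache hc
    simp only [List.foldl_cons]
    rw [pvStep_eq sentence ent_label units hunits FI hFI (stA, cache) p hc]
    exact ih _ _ (pvCacheUpd_ok units cache _ hc)

-- ===== VERDICT (by name: the statement is the Claim_ definition above) =====
theorem annotate_sentence_spec : Claim_equal_annotate_sentence := by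
  intro entity_dict sentence labels ent_label _ _
  unfold Spec_annotate_sentence
  have hA : annotate_sentence entity_dict sentence labels ent_label
      = (sentence,
         (entity_dict.foldl (pvStepA sentence ent_label) (labels, 0)).1,
         (entity_dict.foldl (pvStepA sentence ent_label) (labels, 0)).2) := rfl
  have hB : annotate_sentence_alt entity_dict sentence labels ent_label
      = (sentence,
         (entity_dict.foldl
            (pvStepB (sentence.flatMap (fun tok => (PySem.Str.split? tok " ").getD []))
              ((PySem.List.enumerate sentence).foldl
                (fun (d : PySem.Dict String Int) (p : Int × String) =>
                  if (d.get? p.2).isNone then d.insert p.2 p.1 else d) PySem.Dict.empty)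
              ent_label)
            ((labels, 0), PySem.Dict.empty)).1.1,
         (entity_dict.foldl
            (pvStepB (sentence.flatMap (fun tok => (PySem.Str.split? tok " ").getD []))
              ((PySem.List.enumerate sentence).foldl
                (fun (d : PySem.Dict String Int) (p : Int × String) =>
                  if (d.get? p.2).isNone then d.insert p.2 p.1 else d) PySem.Dict.empty)
              ent_label)
            ((labels, 0), PySem.Dict.empty)).1.2) := rfl
  rw [hA, hB,
    pvLoop sentence ent_label (sentence.flatMap (fun tok => (PySem.Str.split? tok " ").getD [])) rfl
      ((PySem.List.enumerate sentence).foldl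
        (fun (d : PySem.Dict String Int) (p : Int × String) =>
          if (d.get? p.2).isNone then d.insert p.2 p.1 else d) PySem.Dict.empty)
      (pvFI0 sentence) entity_dict (labels, 0) PySem.Dict.empty
      (by intro mi st h; rw [pvDictEmpty_get] at h; cases h)]
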